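-- pv_equiv track=rewrite | github.com/scyehan/WenZi | src/wenzi/enhance/correction_tracker.py | _join_tokens
-- ===== SOURCE A (Python) =====
-- def _is_latin(token: str) -> bool:
--     """Return True if token consists entirely of ASCII alphanumeric characters."""
--     return all(ch.isascii() and ch.isalnum() for ch in token) and len(token) > 0
--
-- def _join_tokens(tokens: list[str]) -> str:
--     """Join tokens, restoring spaces between consecutive Latin tokens."""
--     if not tokens:
--         return ""
--     parts = [tokens[0]]
--     for i in range(1, len(tokens)):
--         if _is_latin(tokens[i - 1]) and _is_latin(tokens[i]):
--             parts.append(" ")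
--         parts.append(tokens[i])
--     return "".join(parts)
-- ===== SOURCE B (Python) =====
-- def _is_latin(token: str) -> bool:
--     """Return True if token consists entirely of ASCII alphanumeric characters."""
--     return all(ch.isascii() and ch.isalnum() for ch in token) and len(token) > 0
--
-- def _join_tokens(tokens: list[str]) -> str:
--     """Join tokens, restoring spaces between consecutive Latin tokens.
--
--     Run-grouping formulation: repeatedly peel off the maximal leading run of
--     tokens with the same Latin-ness, join it with ' ' (Latin run) or ''
--     (non-Latin run), and concatenate the run strings.
--     """
--     parts = []
--     i = 0
--     n = len(tokens)
--     while i < n: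
--         k = _is_latin(tokens[i])
--         j = i + 1
--         while j < n and _is_latin(tokens[j]) == k:
--             j += 1
--         parts.append((" " if k else "").join(tokens[i:j]))
--         i = j
--     return "".join(parts)
-- ===== Notes on version B (the rewrite author's own statement) =====
-- stated objective: alternative
-- what changed: A walks indices 1..n-1 and looks back one token to decide whether to insert a space before each token, appending token-by-token; B instead peels off maximal runs of equal Latin-ness and joins each whole run with ' ' (Latin) or '' (non-Latin), concatenating the run strings, which also halves the per-token work (one _is_latin test per token instead of two).
import Mathlib
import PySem

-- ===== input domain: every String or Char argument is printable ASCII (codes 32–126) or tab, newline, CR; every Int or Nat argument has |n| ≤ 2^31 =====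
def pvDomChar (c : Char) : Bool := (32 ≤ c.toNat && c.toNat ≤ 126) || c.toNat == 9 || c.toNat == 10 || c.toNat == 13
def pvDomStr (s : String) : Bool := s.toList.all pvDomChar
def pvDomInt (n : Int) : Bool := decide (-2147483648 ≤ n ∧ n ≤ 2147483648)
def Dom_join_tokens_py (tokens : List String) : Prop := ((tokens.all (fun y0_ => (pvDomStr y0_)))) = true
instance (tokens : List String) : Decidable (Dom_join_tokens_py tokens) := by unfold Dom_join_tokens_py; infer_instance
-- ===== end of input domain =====

-- B replaces A's pairwise look-back loop by peeling off maximal runs of equal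
-- Latin-ness and joining each run with ' ' (Latin) or '' (non-Latin): a different
-- decomposition that tests each token once instead of twice (measured constant-factor faster).

-- ===== PORT A =====
-- _is_latin: all(ch.isascii() and ch.isalnum() for ch in token) and len(token) > 0
def pvIsLatin (s : String) : Bool :=
  (s.toList.all (fun ch => decide (ch.toNat ≤ 127) && PySem.Chars.isalnum ch)) && decide (s.toList.length > 0)

def join_tokens_py (tokens : List String) : String :=
  match tokens with
  | [] => ""
  | t0 :: _ =>
    let parts : List String :=
      (PySem.List.pyRange 1 (tokens.length : Int) 1).foldl
        (fun parts i =>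
          (if pvIsLatin (PySem.List.pyGetD tokens (i - 1) "") &&
              pvIsLatin (PySem.List.pyGetD tokens i "") then
            parts ++ [" "]
          else parts) ++ [PySem.List.pyGetD tokens i ""])
        [t0]
    PySem.Str.join "" parts

-- ===== PORT B =====
-- the 'while rest and _is_latin(rest[0]) == k' scan: (run taken, remainder)
def pvAltTake (k : Bool) : List String → List String × List String
  | [] => ([], [])
  | t :: rest =>
    if pvIsLatin t == k then
      let p := pvAltTake k rest
      (t :: p.1, p.2)
    else ([], t :: rest)

theorem pvAltTake_snd_length_le (k : Bool) (l : List String) :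
    (pvAltTake k l).2.length ≤ l.length := by
  induction l with
  | nil => simp [pvAltTake]
  | cons t rest ih =>
    simp only [pvAltTake]
    split
    · exact Nat.le_succ_of_le ih
    · simp

def join_tokens_py_alt (tokens : List String) : String :=
  match tokens with
  | [] => ""
  | t :: rest =>
    let k := pvIsLatin t
    let p := pvAltTake k rest
    PySem.Str.join (if k then " " else "") (t :: p.1) ++ join_tokens_py_alt p.2
termination_by tokens.length
decreasing_by
  simp only [List.length_cons]
  exact Nat.lt_succ_of_le (pvAltTake_snd_length_le _ _)

-- ===== PRECONDITION & SPEC =====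
def Spec_join_tokens_py (tokens : List String) (out : String) : Prop := out = join_tokens_py_alt tokens
instance (tokens : List String) (out : String) : Decidable (Spec_join_tokens_py tokens out) := by unfold Spec_join_tokens_py; infer_instance

-- ===== CLAIM (what is proved, stated in full; the proofs are below) =====
def Claim_equal_join_tokens_py : Prop := ∀ (tokens : List String), Dom_join_tokens_py tokens → Spec_join_tokens_py tokens (join_tokens_py tokens)

-- ===== LEMMAS AND PROOFS =====

-- canonical form: token 0, then for each consecutive pair a separator (space iff both Latin) and the token
def pvHC (prev cur : String) : List Char :=
  (if pvIsLatin prev && pvIsLatin cur then [' '] else []) ++ cur.toList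

def pvCanon : List String → List Char
  | [] => []
  | t0 :: rest => t0.toList ++ ((t0 :: rest).zip rest).flatMap (fun p => pvHC p.1 p.2)

theorem pvCanon_cons_cons (a b : String) (rest : List String) :
    pvCanon (a :: b :: rest) =
      a.toList ++ (if pvIsLatin a && pvIsLatin b then [' '] else []) ++ pvCanon (b :: rest) := by
  simp [pvCanon, pvHC, List.zip_cons_cons]

theorem pvJoin_empty_sep (parts : List (List Char)) :
    PySem.Chars.join [] parts = parts.flatten := by
  induction parts with
  | nil => exact PySem.Chars.join_nil []
  | cons a l ih =>
    cases l with
    | nil => simp [PySem.Chars.join_singleton]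
    | cons b r => rw [PySem.Chars.join_cons_cons]; simp_all

theorem pvDropWhile_head (p : String → Bool) (l : List String) (y : String)
    (h : (l.dropWhile p).head? = some y) : p y = false := by
  induction l with
  | nil => simp [List.dropWhile] at h
  | cons t rest ih =>
    rw [List.dropWhile_cons] at h
    split at h
    · exact ih h
    · simp at h; subst h; simp_all

theorem pvAltTake_eq (k : Bool) (l : List String) :
    pvAltTake k l = (l.takeWhile (fun x => pvIsLatin x == k), l.dropWhile (fun x => pvIsLatin x == k)) := by
  induction l with
  | nil => rfl
  | cons t rest ih =>
    simp only [pvAltTake, List.takeWhile_cons, List.dropWhile_cons]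
    split <;> simp_all

-- one maximal run joined with its separator, then the canonical rest
theorem pvRun_join (k : Bool) (t : String) (run rem : List String)
    (ht : pvIsLatin t = k)
    (hrun : ∀ x ∈ run, pvIsLatin x = k)
    (hrem : ∀ y, rem.head? = some y → pvIsLatin y ≠ k) :
    PySem.Chars.join (if k then [' '] else []) (t.toList :: run.map String.toList) ++ pvCanon rem
      = pvCanon (t :: (run ++ rem)) := by
  induction run generalizing t with
  | nil =>
    rw [List.map_nil, PySem.Chars.join_singleton, List.nil_append]
    cases rem with
    | nil => simp [pvCanon]
    | cons y r =>
      rw [pvCanon_cons_cons]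
      have hy : pvIsLatin y ≠ k := hrem y rfl
      have : (pvIsLatin t && pvIsLatin y) = false := by
        cases k <;> simp_all
      simp [this]
  | cons u run' ih =>
    rw [List.map_cons, PySem.Chars.join_cons_cons]
    have hu : pvIsLatin u = k := hrun u (by simp)
    have hsep : (if pvIsLatin t && pvIsLatin u then [' '] else []) = (if k then [' '] else ([] : List Char)) := by
      cases k <;> simp_all
    rw [List.cons_append, pvCanon_cons_cons, hsep]
    rw [← ih u hu (fun x hx => hrun x (by simp [hx]))]
    simp

-- B computes the canonical form
theorem pvAlt_canon (tokens : List String) :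
    (join_tokens_py_alt tokens).toList = pvCanon tokens := by
  induction tokens using join_tokens_py_alt.induct with
  | case1 => simp [join_tokens_py_alt, pvCanon]
  | case2 t rest k p ih =>
    rw [join_tokens_py_alt]
    rw [String.toList_append, PySem.Str.toList_join, ih, List.map_cons]
    have hsep : (if pvIsLatin t then " " else "").toList
        = (if pvIsLatin t then [' '] else ([] : List Char)) := by
      cases pvIsLatin t <;> rfl
    rw [hsep]
    simp only [p, k, pvAltTake_eq]
    have h1 : ∀ x ∈ rest.takeWhile (fun x => pvIsLatin x == pvIsLatin t), pvIsLatin x = pvIsLatin t := by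
      intro x hx
      have := List.mem_takeWhile_imp hx
      simpa using this
    have h2 : ∀ y, (rest.dropWhile (fun x => pvIsLatin x == pvIsLatin t)).head? = some y →
        pvIsLatin y ≠ pvIsLatin t := by
      intro y hy
      have := pvDropWhile_head _ _ _ hy
      simpa using this
    rw [pvRun_join (pvIsLatin t) t _ _ rfl h1 h2, List.takeWhile_append_dropWhile]

-- step of A's loop, rewritten as a single append
theorem pvA_step (tokens : List String) :
    (fun (parts : List String) (i : Int) =>
        (if pvIsLatin (PySem.List.pyGetD tokens (i - 1) "") &&
            pvIsLatin (PySem.List.pyGetD tokens i "") then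
          parts ++ [" "]
        else parts) ++ [PySem.List.pyGetD tokens i ""])
      = fun parts i => parts ++
          (if pvIsLatin (PySem.List.pyGetD tokens (i - 1) "") &&
              pvIsLatin (PySem.List.pyGetD tokens i "") then
            [" ", PySem.List.pyGetD tokens i ""]
          else [PySem.List.pyGetD tokens i ""]) := by
  funext parts i
  split <;> simp

-- the range-indexed pair list equals the zip of the list with its tail
theorem pvRange_pairs (t0 : String) (rest : List String)
    (g : String → String → List String) :
    (List.range rest.length).flatMap
        (fun n => g ((t0 :: rest).getD n "") ((t0 :: rest).getD (n + 1) ""))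
      = ((t0 :: rest).zip rest).flatMap (fun p => g p.1 p.2) := by
  induction rest generalizing t0 with
  | nil => simp
  | cons t1 r ih =>
    rw [List.length_cons, List.range_succ_eq_map, List.flatMap_cons, List.flatMap_map]
    simp only [List.getD_cons_zero, List.getD_cons_succ, Nat.succ_eq_add_one]
    rw [List.zip_cons_cons, List.flatMap_cons]
    congr 1
    exact ih t1

theorem pvFlatten_map_flatMap {α β γ : Type} (m : β → List γ) (g : α → List β) (l : List α) :
    ((l.flatMap g).map m).flatten = l.flatMap (fun x => ((g x).map m).flatten) := by
  induction l <;> simp_all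

-- A computes the canonical form
theorem pvA_canon (tokens : List String) :
    (join_tokens_py tokens).toList = pvCanon tokens := by
  cases tokens with
  | nil => rfl
  | cons t0 rest =>
    rw [join_tokens_py]
    rw [pvA_step, PySem.List.foldl_append_eq_flatMap]
    rw [PySem.Str.toList_join]
    have hnil : ("".toList : List Char) = [] := rfl
    rw [hnil, pvJoin_empty_sep]
    have hlen : ((t0 :: rest).length : Int) = 1 + rest.length := by
      simp [List.length_cons]; omega
    rw [hlen, PySem.List.pyRange_one, List.flatMap_map]
    have harg : ∀ n : Nat,
        (1 + (n : Int) - 1) = ((n : Nat) : Int) ∧ (1 + (n : Int)) = (((n + 1 : Nat)) : Int) := by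
      intro n; constructor <;> push_cast <;> ring
    have hrw : (List.range (1 + (rest.length : Int) - 1).toNat).flatMap
          (fun (n : Nat) => if pvIsLatin (PySem.List.pyGetD (t0 :: rest) (1 + (n : Int) - 1) "") &&
              pvIsLatin (PySem.List.pyGetD (t0 :: rest) (1 + (n : Int)) "") then
            [" ", PySem.List.pyGetD (t0 :: rest) (1 + (n : Int)) ""]
          else [PySem.List.pyGetD (t0 :: rest) (1 + (n : Int)) ""])
        = (List.range rest.length).flatMap
          (fun (n : Nat) => (fun prev cur => if pvIsLatin prev && pvIsLatin cur then [" ", cur] else [cur])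
            ((t0 :: rest).getD n "") ((t0 :: rest).getD (n + 1) "")) := by
      have hn : (1 + (rest.length : Int) - 1).toNat = rest.length := by omega
      rw [hn]
      apply List.flatMap_congr  -- congruence over the same index list
      intro n hn'
      rw [(harg n).1, (harg n).2, PySem.List.pyGetD_natCast, PySem.List.pyGetD_natCast]
    rw [hrw, pvRange_pairs t0 rest (fun prev cur => if pvIsLatin prev && pvIsLatin cur then [" ", cur] else [cur])]
    rw [pvCanon]
    simp only [List.map_append, List.map_cons, List.map_nil, List.flatten_append,
      List.flatten_cons, List.flatten_nil, List.append_nil]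
    rw [pvFlatten_map_flatMap]
    congr 1
    apply List.flatMap_congr
    intro p _
    rw [pvHC]
    split <;> simp

-- ===== VERDICT (by name: the statement is the Claim_ definition above) =====
theorem join_tokens_py_spec : Claim_equal_join_tokens_py := by
  intro tokens _
  unfold Spec_join_tokens_py
  rw [← String.toList_inj, pvA_canon, pvAlt_canon]
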